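-- pv_equiv track=rewrite | github.com/frostant/agent_platform | agents/launch_report/launch_report/report/generator.py | _detect_pairs
-- ===== SOURCE A (Python) =====
-- def _detect_pairs(screenshots):
--     """检测连续的 (非breakdown + breakdown) 对
--
--     Returns:
--         list of (left_idx, right_idx)
--     """
--     pairs = []
--     i = 0
--     while i < len(screenshots) - 1:
--         left = screenshots[i]
--         right = screenshots[i + 1]
--         if left["type"] != "age_breakdown" and right["type"] == "age_breakdown":
--             pairs.append((i, i + 1))
--             i += 2
--         else:
--             i += 1
--     return pairs
-- ===== SOURCE B (Python) =====
-- def _detect_pairs(screenshots):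
--     """检测连续的 (非breakdown + breakdown) 对
--
--     Returns:
--         list of (left_idx, right_idx)
--     """
--     if len(screenshots) < 2:
--         return []
--     # Staged approach: first index all breakdown positions as a set, then a pair
--     # ends exactly at each breakdown position j whose predecessor is not a
--     # breakdown (pairs cannot overlap: a pair's right element is a breakdown,
--     # so it never starts another pair).
--     breakdown = {i for i, s in enumerate(screenshots) if s["type"] == "age_breakdown"}
--     return [(j - 1, j) for j in sorted(breakdown) if j and j - 1 not in breakdown]
-- ===== Notes on version B (the rewrite author's own statement) =====
-- stated objective: alternative
-- what changed: A's stateful while-loop with a conditional variable step (i += 2 after a match) is replaced by a two-stage computation: first build the set of breakdown indices, then emit (j-1, j) for each breakdown index j whose predecessor is not a breakdown; correct because a pair is exactly a breakdown position preceded by a non-breakdown.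
-- outside the precondition, e.g. on _detect_pairs([{'type': 'age_breakdown'}, {}]): A returns [], B raises KeyError
import Mathlib
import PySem

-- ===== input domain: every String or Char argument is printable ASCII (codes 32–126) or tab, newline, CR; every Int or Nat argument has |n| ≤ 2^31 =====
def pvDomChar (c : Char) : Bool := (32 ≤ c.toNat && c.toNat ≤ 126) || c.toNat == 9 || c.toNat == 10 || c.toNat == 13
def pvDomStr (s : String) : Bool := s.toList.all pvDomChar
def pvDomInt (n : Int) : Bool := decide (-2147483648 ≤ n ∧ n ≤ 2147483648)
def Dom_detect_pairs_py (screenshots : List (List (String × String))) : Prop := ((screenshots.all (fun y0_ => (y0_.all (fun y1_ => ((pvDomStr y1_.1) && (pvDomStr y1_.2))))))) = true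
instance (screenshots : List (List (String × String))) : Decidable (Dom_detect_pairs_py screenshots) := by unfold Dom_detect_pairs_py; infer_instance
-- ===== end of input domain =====

-- B replaces A's stateful while-loop (conditional i += 2 step) by a two-stage
-- computation: build the set of breakdown indices, then emit (j-1, j) for each
-- breakdown index j whose predecessor is not a breakdown; same O(n) cost.


-- ===== PORT A =====
-- d["type"] as first-match association-list lookup; the .getD "" default is only
-- reached on a missing key, which Pre_ excludes (Python raises KeyError there).
def pvTypeOf (d : List (String × String)) : String :=
  (d.lookup "type").getD ""

-- the while-loop; fuel (= len(screenshots), one unit per iteration) only makes the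
-- recursion structural — it never runs out while i < len - 1
def pvALoop (ss : List (List (String × String))) (fuel : Nat) (i : Nat) : List (Int × Int) :=
  match fuel with
  | 0 => []
  | fuel + 1 =>
    if i < ss.length - 1 then
      let left := ss.getD i []
      let right := ss.getD (i + 1) []
      if pvTypeOf left ≠ "age_breakdown" ∧ pvTypeOf right = "age_breakdown" then
        ((i : Int), (i : Int) + 1) :: pvALoop ss fuel (i + 2)
      else
        pvALoop ss fuel (i + 1)
    else []

def detect_pairs_py (screenshots : List (List (String × String))) : List (Int × Int) :=
  pvALoop screenshots screenshots.length 0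

-- ===== PORT B =====
-- the set comprehension {i for i, s in enumerate(screenshots) if s["type"] == "age_breakdown"}
def pvBreakdownSet (screenshots : List (List (String × String))) : PySem.Set Int :=
  PySem.Set.ofList ((PySem.List.enumerate screenshots).filterMap fun p =>
    if pvTypeOf p.2 = "age_breakdown" then some p.1 else none)

-- the guard, the set build, and the comprehension over sorted(breakdown)
def detect_pairs_py_alt (screenshots : List (List (String × String))) : List (Int × Int) :=
  if screenshots.length < 2 then []
  else
    let breakdown := pvBreakdownSet screenshots
    (PySem.List.sorted breakdown (fun x => x) false).filterMap fun j =>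
      if j ≠ 0 ∧ ¬ (j - 1) ∈ breakdown then some (j - 1, j) else none

-- ===== PRECONDITION & SPEC =====
-- Pre_ excludes lists of two or more dicts in which some dict lacks the key "type":
-- there both Pythons raise KeyError, except in a degenerate case (the missing key is
-- in a position A's short-circuiting never reads, e.g. the last element after a
-- breakdown) where A returns while B raises.
def Pre_detect_pairs_py (screenshots : List (List (String × String))) : Prop :=
  screenshots.length ≤ 1 ∨ (screenshots.all (fun d => d.any (fun kv => kv.1 == "type"))) = true
instance (screenshots : List (List (String × String))) : Decidable (Pre_detect_pairs_py screenshots) := by unfold Pre_detect_pairs_py; infer_instance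

def pvWitness_detect_pairs_py : (List (List (String × String))) :=
  [[("type", "chart")], [("type", "age_breakdown")]]

def Spec_detect_pairs_py (screenshots : List (List (String × String))) (out : List (Int × Int)) : Prop := out = detect_pairs_py_alt screenshots
instance (screenshots : List (List (String × String))) (out : List (Int × Int)) : Decidable (Spec_detect_pairs_py screenshots out) := by unfold Spec_detect_pairs_py; infer_instance

-- ===== CLAIM (what is proved, stated in full; the proofs are below) =====
def Claim_equal_detect_pairs_py : Prop := ∀ (screenshots : List (List (String × String))), Dom_detect_pairs_py screenshots → Pre_detect_pairs_py screenshots → Spec_detect_pairs_py screenshots (detect_pairs_py screenshots)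

-- ===== LEMMAS AND PROOFS =====

-- the pair condition at index i (abbrev: no new Decidable instance is declared)
abbrev pvCond (ss : List (List (String × String))) (i : Nat) : Prop :=
  pvTypeOf (ss.getD i []) ≠ "age_breakdown" ∧ pvTypeOf (ss.getD (i + 1) []) = "age_breakdown"

-- a matched pair's right element is a breakdown, so no pair starts at i + 1
theorem pvCond_succ_false (ss : List (List (String × String))) (i : Nat)
    (h : pvCond ss i) : ¬ pvCond ss (i + 1) := by
  intro h'
  exact h'.1 h.2

-- A's loop from i computes the uniform scan over the remaining indices
theorem pvALoop_eq (ss : List (List (String × String))) (fuel i : Nat)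
    (hf : ss.length - 1 - i ≤ fuel) :
    pvALoop ss fuel i =
      (List.range' i (ss.length - 1 - i)).filterMap fun j =>
        if pvCond ss j then some ((j : Int), (j : Int) + 1) else none := by
  induction fuel generalizing i with
  | zero =>
    have h0 : ss.length - 1 - i = 0 := by omega
    simp [pvALoop, h0]
  | succ fuel ih =>
    rw [pvALoop]
    by_cases h : i < ss.length - 1
    · have hk1 : ss.length - 1 - i = (ss.length - 1 - (i + 1)) + 1 := by omega
      rw [hk1, List.range'_succ, List.filterMap_cons]
      by_cases hc : pvCond ss i
      · simp only [if_pos h, if_pos hc]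
        congr 1
        by_cases h2 : i + 1 < ss.length - 1
        · have hk2 : ss.length - 1 - (i + 1) = (ss.length - 1 - (i + 2)) + 1 := by omega
          rw [hk2, List.range'_succ, List.filterMap_cons,
            if_neg (pvCond_succ_false ss i hc)]
          exact ih _ (by omega)
        · have hz1 : ss.length - 1 - (i + 1) = 0 := by omega
          have hz2 : ss.length - 1 - (i + 2) = 0 := by omega
          rw [hz1]
          have := ih (i + 2) (by omega)
          rw [hz2] at this
          simpa using this
      · have hc' : ¬ (pvTypeOf (ss.getD i []) ≠ "age_breakdown" ∧
            pvTypeOf (ss.getD (i + 1) []) = "age_breakdown") := hc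
        simp only [if_pos h, if_neg hc']
        exact ih _ (by omega)
    · have h0 : ss.length - 1 - i = 0 := by omega
      simp [if_neg h, h0]

-- the breakdown-index list, as a range filterMap
abbrev pvIdxs (ss : List (List (String × String))) : List Int :=
  (List.range ss.length).filterMap fun k =>
    if pvTypeOf (ss.getD k []) = "age_breakdown" then some ((k : Nat) : Int) else none

-- step 1: the enumerate filterMap equals the range filterMap (generalized start)
theorem pvEnum_aux (l : List (List (String × String))) (s : Int) :
    ((PySem.List.enumerate l s).filterMap fun p =>
        if pvTypeOf p.2 = "age_breakdown" then some p.1 else none)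
    = (List.range l.length).filterMap fun k =>
        if pvTypeOf (l.getD k []) = "age_breakdown" then some (s + (k : Int)) else none := by
  induction l generalizing s with
  | nil => simp [PySem.List.enumerate_nil]
  | cons x xs ih =>
    rw [PySem.List.enumerate_cons, List.filterMap_cons, List.length_cons,
      List.range_succ_eq_map, List.filterMap_cons, List.filterMap_map]
    by_cases hx : pvTypeOf x = "age_breakdown" <;>
      simp [hx, ih (s + 1)] <;>
      · apply List.filterMap_congr
        intro k _
        have hcast : s + 1 + (k : Int) = s + ((k : Int) + 1) := by ring
        rw [hcast]

theorem pvIdxs_pairwise (ss : List (List (String × String))) :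
    (pvIdxs ss).Pairwise (· < ·) := by
  rw [List.pairwise_filterMap]
  refine List.pairwise_lt_range.imp ?_
  intro a a' hlt b hb b' hb'
  by_cases h1 : pvTypeOf (ss.getD a []) = "age_breakdown"
  · by_cases h2 : pvTypeOf (ss.getD a' []) = "age_breakdown"
    · rw [if_pos h1] at hb
      rw [if_pos h2] at hb'
      simp only [Option.some_inj] at hb hb'
      omega
    · rw [if_neg h2] at hb'
      simp at hb'
  · rw [if_neg h1] at hb
    simp at hb

theorem pvBreakdownSet_eq (ss : List (List (String × String))) :
    pvBreakdownSet ss = pvIdxs ss := by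
  unfold pvBreakdownSet
  rw [pvEnum_aux ss 0]
  simp only [Int.zero_add]
  exact PySem.Set.ofList_eq_self_of_nodup _
    ((pvIdxs_pairwise ss).imp (fun h => ne_of_lt h))

theorem pvMem_idxs (ss : List (List (String × String))) (k : Nat) :
    ((k : Int) ∈ pvIdxs ss) ↔ (k < ss.length ∧ pvTypeOf (ss.getD k []) = "age_breakdown") := by
  simp only [pvIdxs, List.mem_filterMap, List.mem_range]
  constructor
  · rintro ⟨a, ha, h⟩
    split_ifs at h with hp
    · obtain rfl : a = k := by exact_mod_cast Option.some_inj.mp h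
      exact ⟨ha, hp⟩
  · rintro ⟨hk, hp⟩
    exact ⟨k, hk, if_pos hp⟩

-- step 6: staged form equals the uniform scan
theorem pvStaged_eq (ss : List (List (String × String))) (n : Nat) :
    ((List.range n).filterMap fun k =>
        if k ≠ 0 ∧ ¬ pvTypeOf (ss.getD (k - 1) []) = "age_breakdown" ∧
           pvTypeOf (ss.getD k []) = "age_breakdown"
        then some (((k - 1 : Nat) : Int), (k : Int)) else none)
    = (List.range (n - 1)).filterMap fun i =>
        if pvCond ss i then some ((i : Int), (i : Int) + 1) else none := by
  induction n with
  | zero => simp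
  | succ n ih =>
    rw [List.range_succ, List.filterMap_append, ih]
    match n with
    | 0 => simp
    | m + 1 =>
      rw [show m + 1 + 1 - 1 = m + 1 from rfl, show m + 1 - 1 = m from rfl,
        List.range_succ, List.filterMap_append]
      congr 1
      simp only [List.filterMap_cons, List.filterMap_nil]
      have hne : m + 1 ≠ 0 := by omega
      have hm1 : m + 1 - 1 = m := rfl
      by_cases hp : pvCond ss m
      · have hc : m + 1 ≠ 0 ∧ ¬ pvTypeOf (ss.getD (m + 1 - 1) []) = "age_breakdown" ∧
            pvTypeOf (ss.getD (m + 1) []) = "age_breakdown" :=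
          ⟨hne, by rw [hm1]; exact hp.1, hp.2⟩
        rw [if_pos hc, if_pos hp]
        have hv : ((m + 1 - 1 : Nat) : Int) = ((m : Nat) : Int) := by rw [hm1]
        have hv2 : ((m + 1 : Nat) : Int) = ((m : Nat) : Int) + 1 := by push_cast; ring
        rw [hv, hv2]
      · rw [if_neg hp, if_neg]
        rintro ⟨_, h2, h3⟩
        exact hp ⟨by rw [hm1] at h2; exact h2, h3⟩

-- sorted over the already-increasing index list is the identity
theorem pvSorted_idxs (ss : List (List (String × String))) :
    PySem.List.sorted (pvIdxs ss) (fun x => x) false = pvIdxs ss :=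
  by
  apply PySem.List.sorted_eq_of_perm_of_pairwise_lt
  · exact List.Perm.refl _
  · exact pvIdxs_pairwise ss

-- composing the two stages gives the staged range filterMap
theorem pvCompose_eq (ss : List (List (String × String))) :
    ((List.range ss.length).filterMap fun k =>
        ((if pvTypeOf (ss.getD k []) = "age_breakdown" then some ((k : Nat) : Int) else none).bind
          fun j => if j ≠ 0 ∧ ¬ (j - 1) ∈ pvIdxs ss then some (j - 1, j) else none))
    = (List.range ss.length).filterMap fun k =>
        if k ≠ 0 ∧ ¬ pvTypeOf (ss.getD (k - 1) []) = "age_breakdown" ∧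
           pvTypeOf (ss.getD k []) = "age_breakdown"
        then some (((k - 1 : Nat) : Int), (k : Int)) else none := by
  apply List.filterMap_congr
  intro k hk
  rw [List.mem_range] at hk
  by_cases hp : pvTypeOf (ss.getD k []) = "age_breakdown"
  · rw [if_pos hp]
    cases k with
    | zero => simp
    | succ m =>
      have hne : ((m + 1 : Nat) : Int) ≠ 0 := by omega
      have hsub : ((m + 1 : Nat) : Int) - 1 = ((m : Nat) : Int) := by push_cast; ring
      have hmem : (((m : Nat) : Int) ∈ pvIdxs ss) ↔ pvTypeOf (ss.getD m []) = "age_breakdown" := by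
        rw [pvMem_idxs]
        exact ⟨fun h => h.2, fun h => ⟨by omega, h⟩⟩
      rw [Option.bind_some, hsub]
      by_cases hq : pvTypeOf (ss.getD m []) = "age_breakdown"
      · rw [if_neg (by rintro ⟨_, hnm⟩; exact hnm (hmem.mpr hq)),
          if_neg (by rintro ⟨_, h2, _⟩; exact h2 hq)]
      · rw [if_pos ⟨hne, by rw [hmem]; exact hq⟩, if_pos ⟨by omega, hq, hp⟩]
        rfl
  · rw [if_neg hp, if_neg (fun h => hp h.2.2)]
    rfl

-- ===== VERDICT (by name: the statement is the Claim_ definition above) =====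
theorem detect_pairs_py_spec : Claim_equal_detect_pairs_py := by
  intro ss _ _
  unfold Spec_detect_pairs_py detect_pairs_py
  rw [pvALoop_eq ss ss.length 0 (by omega), Nat.sub_zero, ← List.range_eq_range']
  by_cases hlen : ss.length < 2
  · have h0 : ss.length - 1 = 0 := by omega
    simp [detect_pairs_py_alt, hlen, h0]
  · simp only [detect_pairs_py_alt, if_neg hlen, pvBreakdownSet_eq, pvSorted_idxs,
      List.filterMap_filterMap]
    rw [pvCompose_eq ss, pvStaged_eq ss ss.length]
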